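-- pv_equiv track=rewrite | github.com/waterlandlab/CluBCpG | clubcpg/ParseBam.py | correct_cpg_positions
-- ===== SOURCE A (Python) =====
-- def correct_cpg_positions(output: list):
--     """
--     For some reason, Bismark alignment produces instances where a CpG site location is incorrect by 1 bp, even
--     after accounting for DNA strand alignmment. This function fixes this. If two cpgs have positions such as 4, 5
--     (which is impossible because there needs to by a G between them) this function will convert all 5s to 4s. This
--     only needs to be applied to matrices which are empty after dropna() is called.
--
--     :param output: a list of lists of tuples. The output of self.parse_reads()
--
--     :return: list of the same style, execpt the first position in the tuple will have a corrected CpG position.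
--
--     """
--     # find all cpg positions
--     cpg_positions = []
--     for item in output:
--         if item:
--             for cpg in item:
--                 cpg_positions.append(cpg[0])
--     cpg_positions = sorted(list(set(cpg_positions)))
--
--     # determine corrections
--     corrections = {}
--     for x in range(len(cpg_positions)):
--         try:
--             if cpg_positions[x + 1] == cpg_positions[x] + 1:
--                 corrections[cpg_positions[x + 1]] = cpg_positions[x]
--         except IndexError:  # end of cpg position list
--             pass
--
--     # correct items
--     corrected_output = []
--     for item in output:
--         corrected_item = []
--         if item:
--             for cpg in item:
--                 if cpg[0] in corrections.keys():
--                     new_cpg = (corrections[cpg[0]], cpg[1])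
--                     corrected_item.append(new_cpg)
--                 else:
--                     corrected_item.append(cpg)
--             corrected_output.append(corrected_item)
--         else:
--             corrected_output.append(item)
--
--     return corrected_output
-- ===== SOURCE B (Python) =====
-- def correct_cpg_positions(output: list):
--     """Same correction in two passes: a CpG position p is shifted to p-1 exactly
--     when p-1 is itself an observed position; no sorted list or correction table."""
--     positions = {cpg[0] for item in output for cpg in item}
--     return [[(p - 1, v) if (p - 1) in positions else (p, v) for (p, v) in item]
--             for item in output]
-- ===== Notes on version B (the rewrite author's own statement) =====
-- stated objective: simpler
-- what changed: B drops A's sorted-distinct-positions pass and the adjacent-pair corrections dict entirely: it collects the positions into a set once and rebuilds every tuple by testing membership of p-1 directly, two comprehensions instead of three loops.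
import Mathlib
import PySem

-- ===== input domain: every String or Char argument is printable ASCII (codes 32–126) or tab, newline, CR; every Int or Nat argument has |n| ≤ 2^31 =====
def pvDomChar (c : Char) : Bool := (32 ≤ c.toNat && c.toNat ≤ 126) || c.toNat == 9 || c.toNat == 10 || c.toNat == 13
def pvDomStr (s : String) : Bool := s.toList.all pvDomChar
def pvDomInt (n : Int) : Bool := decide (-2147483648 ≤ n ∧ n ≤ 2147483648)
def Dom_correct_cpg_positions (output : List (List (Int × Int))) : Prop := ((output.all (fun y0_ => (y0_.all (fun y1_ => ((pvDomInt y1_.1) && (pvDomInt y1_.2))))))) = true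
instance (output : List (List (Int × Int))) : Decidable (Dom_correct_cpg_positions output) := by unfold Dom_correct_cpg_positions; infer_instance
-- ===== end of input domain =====

-- B replaces A's sorted-distinct-list + adjacent-pair corrections dict by a single
-- position set and a direct membership test of p-1 during the rebuild (objective: simpler).

-- ===== PORT A =====
-- loop body of A's 'determine corrections' pass (the try/except IndexError is the none case)
def corrStep (cp : List Int) (d : PySem.Dict Int Int) (x : Int) : PySem.Dict Int Int :=
  match PySem.List.pyGet? cp (x + 1), PySem.List.pyGet? cp x with
  | some a, some b => if a = b + 1 then d.insert a b else d
  | _, _ => d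

-- loop body of A's 'correct items' inner loop ('cpg[0] in corrections.keys()' then index)
def fixOne (corrections : PySem.Dict Int Int) (ci : List (Int × Int)) (cpg : Int × Int) : List (Int × Int) :=
  match corrections.get? cpg.1 with
  | some w => ci ++ [(w, cpg.2)]
  | none => ci ++ [cpg]

def correct_cpg_positions (output : List (List (Int × Int))) : List (List (Int × Int)) :=
  -- find all cpg positions
  let cpg_positions : List Int :=
    output.foldl (fun acc item => if item ≠ [] then item.foldl (fun a cpg => a ++ [cpg.1]) acc else acc) []
  -- cpg_positions = sorted(list(set(cpg_positions)))
  let cpg_sorted : List Int := PySem.List.sorted (PySem.Set.ofList cpg_positions) (fun x => x) false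
  -- determine corrections
  let corrections : PySem.Dict Int Int :=
    (PySem.List.pyRange 0 (PySem.List.len cpg_sorted) 1).foldl (corrStep cpg_sorted) PySem.Dict.empty
  -- correct items
  output.foldl (fun acc item =>
    if item ≠ [] then acc ++ [item.foldl (fixOne corrections) []]
    else acc ++ [item]) []

-- ===== PORT B =====
def correct_cpg_positions_alt (output : List (List (Int × Int))) : List (List (Int × Int)) :=
  let positions : PySem.Set Int := PySem.Set.ofList (output.flatMap (fun item => item.map Prod.fst))
  output.map (fun item => item.map (fun cpg =>
    if PySem.Set.contains positions (cpg.1 - 1) then (cpg.1 - 1, cpg.2) else cpg))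

-- ===== PRECONDITION & SPEC =====
def Spec_correct_cpg_positions (output : List (List (Int × Int))) (out : List (List (Int × Int))) : Prop := out = correct_cpg_positions_alt output
instance (output : List (List (Int × Int))) (out : List (List (Int × Int))) : Decidable (Spec_correct_cpg_positions output out) := by unfold Spec_correct_cpg_positions; infer_instance

-- ===== CLAIM (what is proved, stated in full; the proofs are below) =====
def Claim_equal_correct_cpg_positions : Prop := ∀ (output : List (List (Int × Int))), Dom_correct_cpg_positions output → Spec_correct_cpg_positions output (correct_cpg_positions output)

-- ===== LEMMAS AND PROOFS =====

-- the value a single fixOne step appends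
def fixVal (d : PySem.Dict Int Int) (cpg : Int × Int) : Int × Int :=
  match d.get? cpg.1 with
  | some w => (w, cpg.2)
  | none => cpg

lemma fixOne_eq (d : PySem.Dict Int Int) :
    fixOne d = fun ci cpg => ci ++ [fixVal d cpg] := by
  funext ci cpg
  unfold fixOne fixVal
  cases d.get? cpg.1 <;> rfl

-- characterisation of A's corrections-building fold: lookup at p succeeds (with value p-1)
-- iff some processed index x has cp[x+1] = p and cp[x] = p-1
lemma corr_get (cp : List Int) (p : Int) (l : List Int) : ∀ (d : PySem.Dict Int Int),
    (l.foldl (corrStep cp) d).get? p =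
      if (∃ x ∈ l, PySem.List.pyGet? cp (x+1) = some p ∧ PySem.List.pyGet? cp x = some (p-1))
      then some (p-1) else d.get? p := by
  induction l with
  | nil => intro d; simp
  | cons x t ih =>
    intro d
    simp only [List.foldl_cons]
    rw [ih]
    by_cases ht : ∃ y ∈ t, PySem.List.pyGet? cp (y+1) = some p ∧ PySem.List.pyGet? cp y = some (p-1)
    · rw [if_pos ht, if_pos (by obtain ⟨y, hy, h⟩ := ht; exact ⟨y, List.mem_cons_of_mem _ hy, h⟩)]
    · rw [if_neg ht]
      by_cases hx : PySem.List.pyGet? cp (x+1) = some p ∧ PySem.List.pyGet? cp x = some (p-1)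
      · rw [if_pos ⟨x, List.mem_cons_self, hx⟩]
        unfold corrStep
        rw [hx.1, hx.2]
        simp only [if_pos (by omega : p = p - 1 + 1)]
        exact PySem.Dict.get?_insert_self d p (p-1)
      · rw [if_neg (by rintro ⟨y, hy, h⟩
                       rcases List.mem_cons.mp hy with rfl | hy'
                       · exact hx h
                       · exact ht ⟨y, hy', h⟩)]
        unfold corrStep
        cases h1 : PySem.List.pyGet? cp (x+1) with
        | none => cases h2 : PySem.List.pyGet? cp x <;> rfl
        | some a =>
          cases h2 : PySem.List.pyGet? cp x with
          | none => rfl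
          | some b =>
            simp only []
            split_ifs with hab
            · refine PySem.Dict.get?_insert_of_ne d b (fun hpa => hx ?_)
              subst hpa
              exact ⟨h1, by rw [h2]; congr 1; omega⟩
            · rfl

-- on a strictly increasing cp, such an adjacent pair at p exists iff p and p-1 both occur in cp
lemma exists_pair_iff (cp : List Int) (hs : cp.Pairwise (· < ·)) (p : Int) :
    (∃ x ∈ PySem.List.pyRange 0 (PySem.List.len cp) 1,
      PySem.List.pyGet? cp (x+1) = some p ∧ PySem.List.pyGet? cp x = some (p-1))
    ↔ (p ∈ cp ∧ p - 1 ∈ cp) := by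
  constructor
  · rintro ⟨x, _, h1, h2⟩
    exact ⟨PySem.List.mem_of_pyGet?_eq_some _ h1, PySem.List.mem_of_pyGet?_eq_some _ h2⟩
  · rintro ⟨hp, hp1⟩
    obtain ⟨i, hi, hip⟩ := List.mem_iff_getElem.mp hp
    obtain ⟨j, hj, hjp⟩ := List.mem_iff_getElem.mp hp1
    have hmono : ∀ (a b : Nat) (ha : a < cp.length) (hb : b < cp.length), a < b → cp[a] < cp[b] :=
      fun a b ha hb hab => List.pairwise_iff_getElem.mp hs a b ha hb hab
    have hji : j < i := by
      rcases lt_trichotomy j i with h | h | h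
      · exact h
      · exfalso; subst h; omega
      · exfalso; have := hmono i j hi hj h; omega
    have hij : i = j + 1 := by
      by_contra hne
      have h1 : j + 1 < i := by omega
      have hjl : j + 1 < cp.length := by omega
      have a1 := hmono j (j+1) hj hjl (by omega)
      have a2 := hmono (j+1) i hjl hi h1
      omega
    subst hij
    refine ⟨(j : Int), ?_, ?_, ?_⟩
    · rw [PySem.List.mem_pyRange_one]
      simp only [PySem.List.len_eq]
      constructor
      · positivity
      · exact_mod_cast hj
    · have hcast : ((j : Int) + 1) = ((j + 1 : Nat) : Int) := by push_cast; ring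
      rw [hcast, PySem.List.pyGet?_natCast, List.getElem?_eq_getElem hi, hip]
    · rw [PySem.List.pyGet?_natCast, List.getElem?_eq_getElem hj, hjp]

lemma main_eq (output : List (List (Int × Int))) :
    correct_cpg_positions output = correct_cpg_positions_alt output := by
  have hfun1 : (fun (acc : List Int) (item : List (Int × Int)) =>
      if item ≠ [] then item.foldl (fun a cpg => a ++ [cpg.1]) acc else acc)
      = fun acc item => acc ++ item.map Prod.fst := by
    funext acc item
    by_cases h : item = []
    · subst h; simp
    · rw [if_pos h]
      exact PySem.List.foldl_append_singleton_eq_map (f := Prod.fst) (l := item) (acc := acc)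
  unfold correct_cpg_positions correct_cpg_positions_alt
  simp only []
  rw [hfun1, PySem.List.foldl_append_eq_flatMap, List.nil_append]
  set L := output.flatMap (fun item => item.map Prod.fst) with hLdef
  set cp := PySem.List.sorted (PySem.Set.ofList L) (fun x => x) false with hcpdef
  set D := (PySem.List.pyRange 0 (PySem.List.len cp) 1).foldl (corrStep cp) PySem.Dict.empty with hDdef
  have hmemcp : ∀ q : Int, q ∈ cp ↔ q ∈ L := by
    intro q; rw [hcpdef, PySem.List.mem_sorted, PySem.Set.mem_ofList]
  have hsorted : cp.Pairwise (· < ·) := PySem.List.sorted_ofList_pairwise_lt L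
  have hget : ∀ p : Int, D.get? p = if p ∈ cp ∧ p - 1 ∈ cp then some (p-1) else none := by
    intro p
    rw [hDdef, corr_get cp p _ PySem.Dict.empty]
    simp only [exists_pair_iff cp hsorted p, PySem.Dict.get?_empty]
  have hfun3 : (fun (acc : List (List (Int × Int))) item =>
      if item ≠ [] then acc ++ [item.foldl (fixOne D) []] else acc ++ [item])
      = fun acc item => acc ++ [item.map (fixVal D)] := by
    funext acc item
    by_cases h : item = []
    · subst h; simp
    · rw [if_pos h, fixOne_eq, PySem.List.foldl_append_singleton_eq_map, List.nil_append]
  rw [hfun3, PySem.List.foldl_append_singleton_eq_map, List.nil_append]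
  apply List.map_congr_left
  intro item hitem
  apply List.map_congr_left
  intro cpg hcpg
  have hpmem : cpg.1 ∈ L := List.mem_flatMap.mpr ⟨item, hitem, List.mem_map_of_mem hcpg⟩
  unfold fixVal
  rw [hget cpg.1]
  by_cases hq : cpg.1 - 1 ∈ L
  · rw [if_pos ⟨(hmemcp _).mpr hpmem, (hmemcp _).mpr hq⟩]
    rw [if_pos ((PySem.Set.contains_iff _ _).mpr ((PySem.Set.mem_ofList _ _).mpr hq))]
  · rw [if_neg (fun hc => hq ((hmemcp _).mp hc.2))]
    rw [if_neg (fun hc => hq ((PySem.Set.mem_ofList _ _).mp ((PySem.Set.contains_iff _ _).mp hc)))]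

-- ===== VERDICT (by name: the statement is the Claim_ definition above) =====
theorem correct_cpg_positions_spec : Claim_equal_correct_cpg_positions := by
  intro output _
  unfold Spec_correct_cpg_positions
  exact main_eq output
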